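-- pv_equiv track=rewrite | github.com/darraghmahns/doc-intel-backend | nodes/mapper.py | detect_role_from_label
-- ===== SOURCE A (Python) =====
-- from typing import List, Dict, Optional, Any, Sequence, Union, Set, cast
--
-- SIGNATURE_ROLE_KEYWORDS: Dict[str, List[str]] = {
--     "BUYER": [
--         "buyer", "purchaser", "vendee", "buyer's", "purchaser's",
--         "buyer 1", "buyer 2", "buyer #1", "buyer #2",
--         "co-buyer", "co buyer", "additional buyer",
--     ],
--     "SELLER": [
--         "seller", "vendor", "seller's", "vendor's",
--         "seller 1", "seller 2", "seller #1", "seller #2",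
--         "co-seller", "co seller", "additional seller",
--     ],
--     "TENANT": [
--         "tenant", "lessee", "renter", "tenant's", "lessee's",
--         "tenant 1", "tenant 2", "tenant #1", "tenant #2",
--     ],
--     "LANDLORD": [
--         "landlord", "lessor", "property owner", "landlord's", "lessor's",
--     ],
--     "LISTING_AGENT": [
--         "listing agent", "seller's agent", "seller agent",
--         "listing agent's", "la signature",
--     ],
--     "BUYING_AGENT": [
--         "buying agent", "buyer's agent", "buyer agent",
--         "selling agent", "buying agent's", "ba signature",
--     ],
--     "LISTING_BROKER": [
--         "listing broker", "seller's broker", "listing broker's",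
--     ],
--     "BUYING_BROKER": [
--         "buying broker", "buyer's broker", "selling broker",
--     ],
--     "ESCROW_TITLE_REP": [
--         "escrow", "title", "closing agent", "settlement agent",
--         "escrow officer", "title officer", "title company",
--     ],
--     "LOAN_OFFICER": [
--         "loan officer", "lender", "mortgage", "loan officer's",
--     ],
--     "ATTORNEY": [
--         "attorney", "lawyer", "counsel", "legal",
--     ],
--     "HOME_INSPECTOR": [
--         "inspector", "home inspector", "inspection",
--     ],
--     "APPRAISER": [
--         "appraiser", "appraisal",
--     ],
--     "WITNESS": [
--         "witness", "witness signature", "witnessed by",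
--     ],
--     "NOTARY": [
--         "notary", "notary public", "notarized",
--     ],
-- }
--
-- def detect_role_from_label(label: Optional[str], context_text: Optional[str] = None) -> Optional[str]:
--     """
--     Detect participant role from signature field label and context.
--
--     Args:
--         label: The signature field label (e.g., "Buyer Signature")
--         context_text: Optional nearby text for additional context
--
--     Returns:
--         Detected Dotloop role or None if not detected
--     """
--     if not label:
--         return None
--
--     # Combine label and context for searching
--     search_text = label.lower()
--     if context_text:
--         search_text = f"{search_text} {context_text.lower()}"
--
--     # Build a list of (keyword, role) pairs sorted by keyword length descending
--     # This ensures longer/more specific keywords match first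
--     # e.g., "buyer's agent" matches before "buyer"
--     keyword_role_pairs: List[tuple] = []
--     for role, keywords in SIGNATURE_ROLE_KEYWORDS.items():
--         for keyword in keywords:
--             keyword_role_pairs.append((keyword, role))
--
--     # Sort by keyword length descending (longest first)
--     keyword_role_pairs.sort(key=lambda x: len(x[0]), reverse=True)
--
--     # Check keywords in order of specificity (longest first)
--     for keyword, role in keyword_role_pairs:
--         if keyword in search_text:
--             return role
--
--     return None
-- ===== SOURCE B (Python) =====
-- from typing import List, Dict, Optional
--
-- SIGNATURE_ROLE_KEYWORDS: Dict[str, List[str]] = {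
--     "BUYER": [
--         "buyer", "purchaser", "vendee", "buyer's", "purchaser's",
--         "buyer 1", "buyer 2", "buyer #1", "buyer #2",
--         "co-buyer", "co buyer", "additional buyer",
--     ],
--     "SELLER": [
--         "seller", "vendor", "seller's", "vendor's",
--         "seller 1", "seller 2", "seller #1", "seller #2",
--         "co-seller", "co seller", "additional seller",
--     ],
--     "TENANT": [
--         "tenant", "lessee", "renter", "tenant's", "lessee's",
--         "tenant 1", "tenant 2", "tenant #1", "tenant #2",
--     ],
--     "LANDLORD": [
--         "landlord", "lessor", "property owner", "landlord's", "lessor's",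
--     ],
--     "LISTING_AGENT": [
--         "listing agent", "seller's agent", "seller agent",
--         "listing agent's", "la signature",
--     ],
--     "BUYING_AGENT": [
--         "buying agent", "buyer's agent", "buyer agent",
--         "selling agent", "buying agent's", "ba signature",
--     ],
--     "LISTING_BROKER": [
--         "listing broker", "seller's broker", "listing broker's",
--     ],
--     "BUYING_BROKER": [
--         "buying broker", "buyer's broker", "selling broker",
--     ],
--     "ESCROW_TITLE_REP": [
--         "escrow", "title", "closing agent", "settlement agent",
--         "escrow officer", "title officer", "title company",
--     ],
--     "LOAN_OFFICER": [
--         "loan officer", "lender", "mortgage", "loan officer's",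
--     ],
--     "ATTORNEY": [
--         "attorney", "lawyer", "counsel", "legal",
--     ],
--     "HOME_INSPECTOR": [
--         "inspector", "home inspector", "inspection",
--     ],
--     "APPRAISER": [
--         "appraiser", "appraisal",
--     ],
--     "WITNESS": [
--         "witness", "witness signature", "witnessed by",
--     ],
--     "NOTARY": [
--         "notary", "notary public", "notarized",
--     ],
-- }
--
-- def _search_text(label: str, context_text: Optional[str]) -> str:
--     s = label.lower()
--     if context_text:
--         s = f"{s} {context_text.lower()}"
--     return s
--
-- def detect_role_from_label(label: Optional[str], context_text: Optional[str] = None) -> Optional[str]: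
--     """Scan the table once per candidate keyword length, longest length first,
--     returning on the first match; no pair list is built and nothing is sorted."""
--     if not label:
--         return None
--     search_text = _search_text(label, context_text)
--     max_len = max(len(kw) for kws in SIGNATURE_ROLE_KEYWORDS.values() for kw in kws)
--     for n in range(max_len, 0, -1):
--         for role, keywords in SIGNATURE_ROLE_KEYWORDS.items():
--             for kw in keywords:
--                 if len(kw) == n and kw in search_text:
--                     return role
--     return None
-- ===== Notes on version B (the rewrite author's own statement) =====
-- stated objective: alternative
-- what changed: Replaced build-pair-list + stable sort + scan-for-first-match with a longest-length-first sweep: iterate candidate keyword lengths from the maximum down to 1 and return the first table keyword of that exact length found in the search text, so no pair list is built and nothing is sorted.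
import Mathlib
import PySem

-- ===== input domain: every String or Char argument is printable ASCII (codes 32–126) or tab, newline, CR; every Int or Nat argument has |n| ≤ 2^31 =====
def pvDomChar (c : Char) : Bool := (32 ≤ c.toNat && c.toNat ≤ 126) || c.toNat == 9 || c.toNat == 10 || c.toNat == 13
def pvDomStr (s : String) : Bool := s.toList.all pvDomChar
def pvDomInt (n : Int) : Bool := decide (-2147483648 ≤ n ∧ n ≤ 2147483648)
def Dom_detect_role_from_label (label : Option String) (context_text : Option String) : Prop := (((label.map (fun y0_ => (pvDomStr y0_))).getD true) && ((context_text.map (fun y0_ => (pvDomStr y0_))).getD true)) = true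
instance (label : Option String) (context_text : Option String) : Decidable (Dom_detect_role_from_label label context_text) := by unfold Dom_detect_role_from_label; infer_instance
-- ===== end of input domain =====

-- B replaces A's build-pair-list / stable-sort / first-match with a longest-length-first sweep
-- over candidate keyword lengths (no pair list, no sort); objective: alternative.

-- the module constant SIGNATURE_ROLE_KEYWORDS, shared by both programs
def pvRoleKeywords : List (String × List String) := [
  ("BUYER", ["buyer", "purchaser", "vendee", "buyer's", "purchaser's",
             "buyer 1", "buyer 2", "buyer #1", "buyer #2",
             "co-buyer", "co buyer", "additional buyer"]),
  ("SELLER", ["seller", "vendor", "seller's", "vendor's",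
              "seller 1", "seller 2", "seller #1", "seller #2",
              "co-seller", "co seller", "additional seller"]),
  ("TENANT", ["tenant", "lessee", "renter", "tenant's", "lessee's",
              "tenant 1", "tenant 2", "tenant #1", "tenant #2"]),
  ("LANDLORD", ["landlord", "lessor", "property owner", "landlord's", "lessor's"]),
  ("LISTING_AGENT", ["listing agent", "seller's agent", "seller agent",
                     "listing agent's", "la signature"]),
  ("BUYING_AGENT", ["buying agent", "buyer's agent", "buyer agent",
                    "selling agent", "buying agent's", "ba signature"]),
  ("LISTING_BROKER", ["listing broker", "seller's broker", "listing broker's"]),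
  ("BUYING_BROKER", ["buying broker", "buyer's broker", "selling broker"]),
  ("ESCROW_TITLE_REP", ["escrow", "title", "closing agent", "settlement agent",
                        "escrow officer", "title officer", "title company"]),
  ("LOAN_OFFICER", ["loan officer", "lender", "mortgage", "loan officer's"]),
  ("ATTORNEY", ["attorney", "lawyer", "counsel", "legal"]),
  ("HOME_INSPECTOR", ["inspector", "home inspector", "inspection"]),
  ("APPRAISER", ["appraiser", "appraisal"]),
  ("WITNESS", ["witness", "witness signature", "witnessed by"]),
  ("NOTARY", ["notary", "notary public", "notarized"])]

-- ===== PORT A =====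
-- the final 'for keyword, role in ...: if keyword in search_text: return role' loop
def pvFirstMatch (st : String) : List (String × String) → Option String
  | [] => none
  | p :: t => if PySem.Str.isIn p.1 st then some p.2 else pvFirstMatch st t

def detect_role_from_label (label : Option String) (context_text : Option String) : Option String :=
  match label with
  | none => none
  | some l =>
    if l = "" then none
    else
      let st1 := PySem.Str.lower l
      let st : String := match context_text with
        | none => st1
        | some c => if c = "" then st1 else st1 ++ " " ++ PySem.Str.lower c
      let pairs := pvRoleKeywords.foldl (fun acc rk => rk.2.foldl (fun a kw => a ++ [(kw, rk.1)]) acc) []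
      let sp := PySem.List.sorted pairs (fun p => PySem.Str.len p.1) true
      pvFirstMatch st sp

-- ===== PORT B =====
-- helper _search_text of Source B
def pvSearchText (l : String) (context_text : Option String) : String :=
  let s := PySem.Str.lower l
  match context_text with
  | none => s
  | some c => if c = "" then s else s ++ " " ++ PySem.Str.lower c

-- innermost loop: 'for kw in keywords: if len(kw) == n and kw in search_text: return role'
def pvScanKws (st : String) (n : Int) (role : String) : List String → Option String
  | [] => none
  | kw :: t =>
    if PySem.Str.len kw == n && PySem.Str.isIn kw st then some role else pvScanKws st n role t

-- middle loop over the table's (role, keywords) items, propagating the early return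
def pvScanTable (st : String) (n : Int) : List (String × List String) → Option String
  | [] => none
  | rk :: t =>
    match pvScanKws st n rk.1 rk.2 with
    | some r => some r
    | none => pvScanTable st n t

-- outer loop 'for n in range(max_len, 0, -1)'
def pvScanLens (st : String) : List Int → Option String
  | [] => none
  | n :: t =>
    match pvScanTable st n pvRoleKeywords with
    | some r => some r
    | none => pvScanLens st t

def detect_role_from_label_alt (label : Option String) (context_text : Option String) : Option String :=
  match label with
  | none => none
  | some l =>
    if l = "" then none
    else
      let st := pvSearchText l context_text
      -- max(len(kw) for ...): the generator is a nonempty constant, so Python's max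
      -- never raises; '.getD 0' only discharges the impossible empty case
      let maxLen : Int := (PySem.List.max?
        (pvRoleKeywords.flatMap (fun rk => rk.2.map (fun kw => PySem.Str.len kw)))
        (fun x => x)).getD 0
      pvScanLens st (PySem.List.pyRange maxLen 0 (-1))

-- ===== PRECONDITION & SPEC =====
def Spec_detect_role_from_label (label : Option String) (context_text : Option String) (out : Option String) : Prop := out = detect_role_from_label_alt label context_text
instance (label : Option String) (context_text : Option String) (out : Option String) : Decidable (Spec_detect_role_from_label label context_text out) := by unfold Spec_detect_role_from_label; infer_instance

-- ===== CLAIM (what is proved, stated in full; the proofs are below) =====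
def Claim_equal_detect_role_from_label : Prop := ∀ (label : Option String) (context_text : Option String), Dom_detect_role_from_label label context_text → Spec_detect_role_from_label label context_text (detect_role_from_label label context_text)

-- ===== LEMMAS AND PROOFS =====

-- the pair list B implicitly traverses for one candidate length n
def pvPairsOfLen (n : Int) : List (String × String) :=
  pvRoleKeywords.flatMap (fun rk =>
    (rk.2.filter (fun kw => PySem.Str.len kw == n)).map (fun kw => (kw, rk.1)))

lemma pvFirstMatch_append (st : String) (a b : List (String × String)) :
    pvFirstMatch st (a ++ b) =
      (match pvFirstMatch st a with | some r => some r | none => pvFirstMatch st b) := by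
  induction a with
  | nil => rfl
  | cons p t ih =>
    simp only [List.cons_append, pvFirstMatch]
    split_ifs <;> simp [ih]

lemma pvScanKws_eq (st : String) (n : Int) (role : String) (kws : List String) :
    pvScanKws st n role kws =
      pvFirstMatch st ((kws.filter (fun kw => PySem.Str.len kw == n)).map (fun kw => (kw, role))) := by
  induction kws with
  | nil => rfl
  | cons kw t ih =>
    simp only [pvScanKws, List.filter_cons]
    cases hn : (PySem.Str.len kw == n) with
    | false => simpa [hn] using ih
    | true =>
      simp only [Bool.true_and, if_true, List.map_cons, pvFirstMatch]
      split_ifs <;> simp [ih]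

lemma pvScanTable_eq (st : String) (n : Int) (tbl : List (String × List String)) :
    pvScanTable st n tbl =
      pvFirstMatch st (tbl.flatMap (fun rk =>
        (rk.2.filter (fun kw => PySem.Str.len kw == n)).map (fun kw => (kw, rk.1)))) := by
  induction tbl with
  | nil => rfl
  | cons rk t ih =>
    simp only [pvScanTable, List.flatMap_cons, pvFirstMatch_append, pvScanKws_eq, ih]

lemma pvScanLens_eq (st : String) (ns : List Int) :
    pvScanLens st ns = pvFirstMatch st (ns.flatMap pvPairsOfLen) := by
  induction ns with
  | nil => rfl
  | cons n t ih =>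
    simp only [pvScanLens, List.flatMap_cons, pvFirstMatch_append, ih]
    rw [pvScanTable_eq]
    rfl

-- the two closed traversal orders coincide: A's stable length-descending sort of the
-- flattened pair list equals B's concatenation of the exact-length buckets, longest first
lemma pvLists_eq :
    PySem.List.sorted
        (pvRoleKeywords.foldl (fun acc rk => rk.2.foldl (fun a kw => a ++ [(kw, rk.1)]) acc) [])
        (fun p => PySem.Str.len p.1) true
      = (PySem.List.pyRange
          ((PySem.List.max?
            (pvRoleKeywords.flatMap (fun rk => rk.2.map (fun kw => PySem.Str.len kw)))
            (fun x => x)).getD 0) 0 (-1)).flatMap pvPairsOfLen := by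
  decide

-- ===== VERDICT (by name: the statement is the Claim_ definition above) =====
theorem detect_role_from_label_spec : Claim_equal_detect_role_from_label := by
  intro label context_text _
  unfold Spec_detect_role_from_label detect_role_from_label detect_role_from_label_alt
  cases label with
  | none => rfl
  | some l =>
    by_cases hl : l = ""
    · simp [hl]
    · simp only [if_neg hl, pvSearchText]
      rw [pvScanLens_eq, ← pvLists_eq]
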